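-- pv_equiv track=rewrite | github.com/embydextrous/Interview | heap/7-minimumSumOfSquares.py | minimumSumOfSquares
-- ===== SOURCE A (Python) =====
-- import heapq
--
-- def minimumSumOfSquares(s, k):
--     # 1. find frequency of each element - value is -ve to simulate maxHeap
--     d = { x : -1 * s.count(x) for x in s }
--     values = list(d.values())
--     # Build max heap
--     heapq.heapify(values)
--     # In each turn check if heap top
--     # if heap top is 0 return 0
--     # else remove 1 from top element and call heapify again
--     for i in range(k):
--         x = -values[0]
--         if x == 0:
--             return 0
--         values[0] += 1
--         heapq.heapify(values)
--     sum = 0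
--     for i in range(len(values)):
--         sum += values[i] ** 2
--     return sum
-- ===== SOURCE B (Python) =====
-- def minimumSumOfSquares(s, k):
--     # One-pass frequency count, then water-filling in closed form:
--     # find the least level t such that reducing every frequency above t down
--     # to t uses at most k removals (binary search), spend the remainder r on
--     # r single decrements from level t, and evaluate the sum of squares
--     # arithmetically.  No heap and no per-removal loop.
--     freq = {}
--     for ch in s:
--         freq[ch] = freq.get(ch, 0) + 1
--     fs = list(freq.values())
--     total = sum(fs)
--     if k >= total:
--         return 0
--     if k <= 0:
--         return sum(f * f for f in fs)
--
--     def cost(t):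
--         return sum(f - t for f in fs if f > t)
--
--     lo, hi = 1, max(fs)
--     while lo < hi:
--         mid = (lo + hi) // 2
--         if cost(mid) <= k:
--             hi = mid
--         else:
--             lo = mid + 1
--     t = lo
--     r = k - cost(t)
--     return sum(min(f, t) ** 2 for f in fs) - r * (2 * t - 1)
-- ===== Notes on version B (the rewrite author's own statement) =====
-- stated objective: faster
-- what changed: A counts each character with s.count inside a dict comprehension and then removes characters one at a time from a max-heap, re-heapifying after every single removal; B counts in one pass and computes the final configuration in closed form (binary search for the water-filling level t, then an arithmetic formula for the sum of squares), with no per-removal loop.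
import Mathlib
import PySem

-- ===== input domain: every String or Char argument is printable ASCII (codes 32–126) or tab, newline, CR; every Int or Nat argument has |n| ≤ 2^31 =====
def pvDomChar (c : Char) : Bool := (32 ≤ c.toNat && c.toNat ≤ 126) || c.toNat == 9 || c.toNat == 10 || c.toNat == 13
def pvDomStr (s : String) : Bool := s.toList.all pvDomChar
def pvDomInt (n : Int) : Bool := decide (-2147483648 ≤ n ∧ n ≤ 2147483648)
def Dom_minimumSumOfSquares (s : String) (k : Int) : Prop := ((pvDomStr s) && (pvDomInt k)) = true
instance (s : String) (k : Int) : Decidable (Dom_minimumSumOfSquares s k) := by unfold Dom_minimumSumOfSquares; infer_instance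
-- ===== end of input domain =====

-- B replaces A's heap simulation (one O(n) re-heapify per removed character) by a
-- closed-form water-filling computation: binary search for the final level, then
-- evaluate the sum of squares arithmetically — faster, no per-removal loop.

-- ===== PORT A =====
-- heapq.heapify ported as: bring a minimal element to the front.  A only ever
-- observes values[0] (the heap root, a minimum of the list) and the multiset of
-- entries, and re-heapifies after every mutation, so the value A returns is
-- exactly CPython's for any valid heap layout.
def pvHeapify (v : List Int) : List Int :=
  match PySem.List.min? v (fun x => x) with
  | none => []
  | some m => m :: v.erase m

-- the 'for i in range(k)' loop (state already heapified on entry), then the final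
-- 'sum += values[i] ** 2' loop; none = IndexError from 'values[0]' on an empty list
def pvALoop : Nat → List Int → Option Int
  | 0, v => some (v.foldl (fun acc x => acc + x ^ 2) 0)
  | n + 1, v =>
    match v with
    | [] => none
    | v0 :: rest => if -v0 == 0 then some 0 else pvALoop n (pvHeapify ((v0 + 1) :: rest))

def minimumSumOfSquares (s : String) (k : Int) : Int :=
  let xs := s.toList
  -- d = { x : -1 * s.count(x) for x in s }; s.count of a 1-character string is the
  -- count of that character, so it is ported as List.count
  let d := xs.foldl (fun d x => d.insert x (-1 * (xs.count x : Int))) PySem.Dict.empty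
  let values := PySem.Dict.values d
  (pvALoop k.toNat (pvHeapify values)).getD 0

-- ===== PORT B =====
-- cost(t) = sum(f - t for f in fs if f > t)
def pvCost (fs : List Int) (t : Int) : Int :=
  fs.foldl (fun a f => if f > t then a + (f - t) else a) 0

-- while lo < hi: mid = (lo+hi)//2; if cost(mid) <= k: hi = mid else: lo = mid+1
def pvBSearch (fs : List Int) (k : Int) (lo hi : Int) : Int :=
  if h : lo < hi then
    if pvCost fs (PySem.Int.floordiv (lo + hi) 2) ≤ k then
      pvBSearch fs k lo (PySem.Int.floordiv (lo + hi) 2)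
    else
      pvBSearch fs k (PySem.Int.floordiv (lo + hi) 2 + 1) hi
  else lo
termination_by (hi - lo).toNat
decreasing_by
  · have := (PySem.Int.floordiv_two_mid_bounds (le_of_lt h)).1
    have h2 : PySem.Int.floordiv (lo + hi) 2 < hi := by
      have := PySem.Int.floordiv_eq_ediv_of_pos (a := lo + hi) (b := 2) (by omega)
      omega
    omega
  · have h1 : lo ≤ PySem.Int.floordiv (lo + hi) 2 := (PySem.Int.floordiv_two_mid_bounds (le_of_lt h)).1
    omega

def minimumSumOfSquares_alt (s : String) (k : Int) : Int :=
  let xs := s.toList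
  let freq := xs.foldl (fun d ch => d.insert ch (d.getD ch 0 + 1)) PySem.Dict.empty
  let fs := PySem.Dict.values freq
  let total := fs.foldl (· + ·) 0
  if k ≥ total then 0
  else if k ≤ 0 then fs.foldl (fun a f => a + f * f) 0
  else
    let t := pvBSearch fs k 1 ((PySem.List.max? fs (fun x => x)).getD 0)
    let r := k - pvCost fs t
    (fs.foldl (fun a f => a + (min f t) * (min f t)) 0) - r * (2 * t - 1)

-- ===== PRECONDITION & SPEC =====
-- Pre_ excludes only the inputs where A raises IndexError: an empty string with k ≥ 1
-- ('values[0]' on an empty heap).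
def Pre_minimumSumOfSquares (s : String) (k : Int) : Prop := s ≠ "" ∨ k ≤ 0
instance (s : String) (k : Int) : Decidable (Pre_minimumSumOfSquares s k) := by
  unfold Pre_minimumSumOfSquares; infer_instance
def pvWitness_minimumSumOfSquares : String × Int := ("aab", 2)

def Spec_minimumSumOfSquares (s : String) (k : Int) (out : Int) : Prop := out = minimumSumOfSquares_alt s k
instance (s : String) (k : Int) (out : Int) : Decidable (Spec_minimumSumOfSquares s k out) := by unfold Spec_minimumSumOfSquares; infer_instance

-- ===== CLAIM (what is proved, stated in full; the proofs are below) =====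
def Claim_equal_minimumSumOfSquares : Prop := ∀ (s : String) (k : Int), Dom_minimumSumOfSquares s k → Pre_minimumSumOfSquares s k → Spec_minimumSumOfSquares s k (minimumSumOfSquares s k)

-- ===== LEMMAS AND PROOFS =====

-- sum of squares of the (ℕ-valued) frequency multiset, as an integer
def pvSumSq (P : Multiset ℕ) : Int := (P.map (fun p : ℕ => ((p : Int)) ^ 2)).sum

-- abstract greedy: k times decrement a maximal element (0 once the maximum is 0)
def pvGv : ℕ → Multiset ℕ → Int
  | 0, P => pvSumSq P
  | n + 1, P => if P.sup = 0 then 0 else pvGv n ((P.erase P.sup).cons (P.sup - 1))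

-- unit layers: a frequency p contributes layers p, p-1, …, 1
def pvLayers (P : Multiset ℕ) : Multiset ℕ := P.bind (fun p => (List.range' 1 p : List ℕ))

-- weight of removing a layer at height v: v² - (v-1)² = 2v - 1
def pvW (v : ℕ) : Int := 2 * (v : Int) - 1

def pvWsum (L : Multiset ℕ) : Int := (L.map pvW).sum

-- sum of the k largest layer weights, greedily
def pvTopW : ℕ → Multiset ℕ → Int
  | 0, _ => 0
  | n + 1, L => pvW L.sup + pvTopW n (L.erase L.sup)

lemma pv_sup_mem (P : Multiset ℕ) (h : P ≠ 0) : P.sup ∈ P := by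
  induction P using Multiset.induction_on with
  | empty => exact absurd rfl h
  | cons a s ih =>
    by_cases hs : s = 0
    · subst hs; simp
    · rw [Multiset.sup_cons]
      by_cases hle : a ≤ s.sup
      · rw [sup_eq_right.mpr hle]
        exact Multiset.mem_cons_of_mem (ih hs)
      · rw [sup_eq_left.mpr (le_of_not_ge hle)]
        exact Multiset.mem_cons_self a s

lemma pv_sum_zero_of_sup_zero (P : Multiset ℕ) (h : P.sup = 0) : P.sum = 0 := by
  refine Multiset.sum_eq_zero ?_
  intro x hx
  have := Multiset.le_sup hx
  omega

-- gv = sumSq - (sum of the k largest layer weights)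
lemma pv_layers_cons (a : ℕ) (s : Multiset ℕ) :
    pvLayers (a ::ₘ s) = (↑(List.range' 1 a) : Multiset ℕ) + pvLayers s := by
  simp [pvLayers]

lemma pv_range_concat (a : ℕ) (ha : 1 ≤ a) :
    List.range' 1 a = List.range' 1 (a - 1) ++ [a] := by
  have : a = (a - 1) + 1 := by omega
  rw [this, List.range'_concat]
  congr 2
  omega

lemma pv_sup_range (a : ℕ) : ((↑(List.range' 1 a) : Multiset ℕ)).sup = a := by
  cases a with
  | zero => simp
  | succ n =>
    refine le_antisymm (Multiset.sup_le.mpr ?_) (Multiset.le_sup ?_)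
    · intro x hx
      rw [Multiset.mem_coe, List.mem_range'_1] at hx
      omega
    · rw [Multiset.mem_coe, List.mem_range'_1]
      omega

lemma pv_sup_layers (P : Multiset ℕ) : (pvLayers P).sup = P.sup := by
  induction P using Multiset.induction_on with
  | empty => simp [pvLayers]
  | cons a s ih =>
    rw [pv_layers_cons, Multiset.sup_add, ih, pv_sup_range, Multiset.sup_cons]

lemma pv_layers_step (P : Multiset ℕ) (hP : P ≠ 0) (hM : P.sup ≠ 0) :
    pvLayers ((P.erase P.sup).cons (P.sup - 1)) = (pvLayers P).erase P.sup := by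
  have hmem : P.sup ∈ P := pv_sup_mem P hP
  have hcons : P.sup ::ₘ P.erase P.sup = P := Multiset.cons_erase hmem
  have h1 : pvLayers P = (↑(List.range' 1 P.sup) : Multiset ℕ) + pvLayers (P.erase P.sup) := by
    conv_lhs => rw [← hcons]
    rw [pv_layers_cons]
  have hmemr : P.sup ∈ (↑(List.range' 1 P.sup) : Multiset ℕ) := by
    rw [Multiset.mem_coe, List.mem_range'_1]
    omega
  rw [h1, Multiset.erase_add_left_pos _ hmemr, pv_layers_cons]
  congr 1
  rw [pv_range_concat P.sup (by omega)]
  have h2 : (↑(List.range' 1 (P.sup - 1) ++ [P.sup]) : Multiset ℕ) =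
      (↑(List.range' 1 (P.sup - 1)) : Multiset ℕ) + {P.sup} := by
    rfl
  rw [h2, Multiset.erase_add_right_pos _ (by simp), Multiset.erase_singleton, add_zero]

lemma pv_sumSq_cons (a : ℕ) (s : Multiset ℕ) : pvSumSq (a ::ₘ s) = (a : Int) ^ 2 + pvSumSq s := by
  simp [pvSumSq]

lemma pv_gv_eq_topW : ∀ (k : ℕ) (P : Multiset ℕ), k ≤ P.sum →
    pvGv k P = pvSumSq P - pvTopW k (pvLayers P) := by
  intro k
  induction k with
  | zero => intro P _; simp [pvGv, pvTopW]
  | succ n ih =>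
    intro P h
    have hP : P ≠ 0 := by
      intro h0; subst h0; simp at h
    have hM : P.sup ≠ 0 := by
      intro h0
      have := pv_sum_zero_of_sup_zero P h0
      omega
    have hmem : P.sup ∈ P := pv_sup_mem P hP
    have hcons : P.sup ::ₘ P.erase P.sup = P := Multiset.cons_erase hmem
    have hsum : P.sum = P.sup + (P.erase P.sup).sum := by
      conv_lhs => rw [← hcons]
      rw [Multiset.sum_cons]
    have hstep_sum : ((P.erase P.sup).cons (P.sup - 1)).sum = P.sum - 1 := by
      rw [Multiset.sum_cons]
      omega
    simp only [pvGv, if_neg hM]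
    rw [ih _ (by omega)]
    simp only [pvTopW]
    rw [pv_sup_layers P, pv_layers_step P hP hM]
    have hsq : pvSumSq P = ((P.sup : Int)) ^ 2 + pvSumSq (P.erase P.sup) := by
      conv_lhs => rw [← hcons]
      rw [pv_sumSq_cons]
    have hstep_sq : pvSumSq ((P.erase P.sup).cons (P.sup - 1)) = pvSumSq P - pvW P.sup := by
      rw [pv_sumSq_cons, hsq]
      have hc : ((P.sup - 1 : ℕ) : Int) = (P.sup : Int) - 1 := by omega
      rw [hc, pvW]
      ring
    rw [hstep_sq]
    ring

lemma pv_sumSq_eq_zero (P : Multiset ℕ) (h : P.sum = 0) : pvSumSq P = 0 := by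
  induction P using Multiset.induction_on with
  | empty => simp [pvSumSq]
  | cons a s ih =>
    rw [Multiset.sum_cons] at h
    rw [pv_sumSq_cons, ih (by omega)]
    have ha : a = 0 := by omega
    simp [ha]

-- once the budget reaches the total, everything is levelled to 0
lemma pv_gv_zero : ∀ (k : ℕ) (P : Multiset ℕ), P.sum ≤ k → pvGv k P = 0 := by
  intro k
  induction k with
  | zero =>
    intro P h
    simp only [pvGv]
    exact pv_sumSq_eq_zero P (by omega)
  | succ n ih =>
    intro P h
    simp only [pvGv]
    by_cases hM : P.sup = 0
    · simp [hM]
    · rw [if_neg hM]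
      apply ih
      have hP : P ≠ 0 := by
        intro h0; subst h0; simp at hM
      have hmem : P.sup ∈ P := pv_sup_mem P hP
      have hcons : P.sup ::ₘ P.erase P.sup = P := Multiset.cons_erase hmem
      have : P.sup + (P.erase P.sup).sum = P.sum := by
        conv_rhs => rw [← hcons]; rw [Multiset.sum_cons]
      rw [Multiset.sum_cons]
      omega

-- threshold characterisation of the top-k weight sum
lemma pv_topW_char : ∀ (k : ℕ) (L : Multiset ℕ) (T : ℕ), 1 ≤ T →
    Multiset.card (L.filter (fun v => T < v)) ≤ k →
    k ≤ Multiset.card (L.filter (fun v => T ≤ v)) →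
    pvTopW k L = pvWsum (L.filter (fun v => T < v)) +
      ((k : Int) - (Multiset.card (L.filter (fun v => T < v)) : Int)) * (2 * (T : Int) - 1) := by
  intro k
  induction k with
  | zero =>
    intro L T hT h1 h2
    have h0 : L.filter (fun v => T < v) = 0 := by
      rw [← Multiset.card_eq_zero]; omega
    simp [pvTopW, h0, pvWsum]
  | succ n ih =>
    intro L T hT h1 h2
    have hLne : L ≠ 0 := by
      intro h0; subst h0; simp at h2
    have hmem : L.sup ∈ L := pv_sup_mem L hLne
    have hconsL : L.sup ::ₘ L.erase L.sup = L := Multiset.cons_erase hmem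
    by_cases hMT : T < L.sup
    · -- the maximal layer is above the threshold
      have hfLt : L.filter (fun v => T < v) = L.sup ::ₘ (L.erase L.sup).filter (fun v => T < v) := by
        conv_lhs => rw [← hconsL]
        rw [Multiset.filter_cons, if_pos hMT, Multiset.singleton_add]
      have hfLe : L.filter (fun v => T ≤ v) = L.sup ::ₘ (L.erase L.sup).filter (fun v => T ≤ v) := by
        conv_lhs => rw [← hconsL]
        rw [Multiset.filter_cons, if_pos (by omega : T ≤ L.sup), Multiset.singleton_add]
      have hc1 : Multiset.card ((L.erase L.sup).filter (fun v => T < v)) + 1 =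
          Multiset.card (L.filter (fun v => T < v)) := by
        rw [hfLt, Multiset.card_cons]
      have hc2 : Multiset.card ((L.erase L.sup).filter (fun v => T ≤ v)) + 1 =
          Multiset.card (L.filter (fun v => T ≤ v)) := by
        rw [hfLe, Multiset.card_cons]
      have hrec := ih (L.erase L.sup) T hT (by omega) (by omega)
      simp only [pvTopW]
      rw [hrec, hfLt]
      simp only [pvWsum, Multiset.map_cons, Multiset.sum_cons, Multiset.card_cons]
      push_cast
      ring
    · -- every layer is ≤ the threshold, and the maximal one equals it
      have hTle : T ≤ L.sup := by
        have hpos : L.filter (fun v => T ≤ v) ≠ 0 := by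
          intro h0
          rw [h0] at h2
          simp at h2
        obtain ⟨x, hx⟩ := Multiset.exists_mem_of_ne_zero hpos
        have hx' := Multiset.of_mem_filter hx
        have hxL := Multiset.mem_of_mem_filter hx
        have := Multiset.le_sup hxL
        omega
      have hMeq : L.sup = T := by omega
      have hflt0 : L.filter (fun v => T < v) = 0 := by
        rw [Multiset.filter_eq_nil]
        intro a ha
        have := Multiset.le_sup ha
        omega
      have hflt0' : (L.erase L.sup).filter (fun v => T < v) = 0 := by
        rw [Multiset.filter_eq_nil]
        intro a ha
        have := Multiset.le_sup (Multiset.mem_of_mem_erase ha)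
        omega
      have hfLe : L.filter (fun v => T ≤ v) = L.sup ::ₘ (L.erase L.sup).filter (fun v => T ≤ v) := by
        conv_lhs => rw [← hconsL]
        rw [Multiset.filter_cons, if_pos (by omega : T ≤ L.sup), Multiset.singleton_add]
      have hc2 : Multiset.card ((L.erase L.sup).filter (fun v => T ≤ v)) + 1 =
          Multiset.card (L.filter (fun v => T ≤ v)) := by
        rw [hfLe, Multiset.card_cons]
      have hrec := ih (L.erase L.sup) T hT (by rw [hflt0']; simp) (by omega)
      simp only [pvTopW]
      rw [hrec, hflt0, hflt0', hMeq]
      simp only [pvWsum, Multiset.map_zero, Multiset.sum_zero, Multiset.card_zero, pvW]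
      push_cast
      ring

lemma pv_range_split (n : ℕ) : (↑(List.range' 1 (n + 1)) : Multiset ℕ) =
    (↑(List.range' 1 n) : Multiset ℕ) + {n + 1} := by
  rw [List.range'_concat, show 1 + 1 * n = n + 1 from by omega]
  rfl

lemma pv_card_range_lt (a T : ℕ) :
    Multiset.card ((↑(List.range' 1 a) : Multiset ℕ).filter (fun v => T < v)) = a - T := by
  induction a with
  | zero => simp
  | succ n ih =>
    rw [pv_range_split, Multiset.filter_add, Multiset.card_add, ih, Multiset.filter_singleton]
    by_cases h : T < n + 1
    · simp [h]
      omega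
    · simp [h]
      omega

lemma pv_wsum_range_lt (a T : ℕ) :
    pvWsum ((↑(List.range' 1 a) : Multiset ℕ).filter (fun v => T < v)) =
      (a : Int) ^ 2 - ((min a T : ℕ) : Int) ^ 2 := by
  induction a with
  | zero => simp [pvWsum]
  | succ n ih =>
    rw [pv_range_split, Multiset.filter_add, Multiset.filter_singleton]
    simp only [pvWsum, Multiset.map_add, Multiset.sum_add] at ih ⊢
    rw [ih]
    by_cases h : T < n + 1
    · simp only [if_pos h, Multiset.map_singleton, Multiset.sum_singleton, pvW]
      have h1 : min (n + 1) T = T := by omega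
      have h2 : min n T = T := by omega
      rw [h1, h2]
      push_cast
      ring
    · have h1 : min (n + 1) T = n + 1 := by omega
      have h2 : min n T = n := by omega
      rw [if_neg h, h1, h2]
      simp

-- counting layers above a threshold
lemma pv_card_layers_lt (P : Multiset ℕ) (T : ℕ) :
    Multiset.card ((pvLayers P).filter (fun v => T < v)) = (P.map (fun p => p - T)).sum := by
  induction P using Multiset.induction_on with
  | empty => simp [pvLayers]
  | cons a s ih =>
    rw [pv_layers_cons, Multiset.filter_add, Multiset.card_add, ih, Multiset.map_cons,
      Multiset.sum_cons, pv_card_range_lt]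

lemma pv_card_layers_le (P : Multiset ℕ) (T : ℕ) (hT : 1 ≤ T) :
    Multiset.card ((pvLayers P).filter (fun v => T ≤ v)) = (P.map (fun p => p - (T - 1))).sum := by
  have h : (pvLayers P).filter (fun v => T ≤ v) = (pvLayers P).filter (fun v => (T - 1) < v) := by
    apply Multiset.filter_congr
    intro x _
    omega
  rw [h, pv_card_layers_lt]

-- weight of the layers above a threshold
lemma pv_wsum_layers_lt (P : Multiset ℕ) (T : ℕ) :
    pvWsum ((pvLayers P).filter (fun v => T < v)) =
      pvSumSq P - (P.map (fun p : ℕ => (((min p T : ℕ)) : Int) ^ 2)).sum := by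
  induction P using Multiset.induction_on with
  | empty => simp [pvLayers, pvWsum, pvSumSq]
  | cons a s ih =>
    rw [pv_layers_cons, Multiset.filter_add]
    simp only [pvWsum, Multiset.map_add, Multiset.sum_add] at ih ⊢
    rw [ih, pv_sumSq_cons, Multiset.map_cons, Multiset.sum_cons]
    have := pv_wsum_range_lt a T
    simp only [pvWsum] at this
    rw [this]
    push_cast
    ring

-- ---- bridging the A port to pvGv ----

lemma pv_foldl_sq (l : List Int) : ∀ a : Int,
    l.foldl (fun acc x => acc + x ^ 2) a = a + (l.map (fun x => x ^ 2)).sum := by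
  induction l with
  | nil => intro a; simp
  | cons x xs ih =>
    intro a
    simp only [List.foldl_cons, List.map_cons, List.sum_cons, ih]
    ring

lemma pv_mset_sq (v : List Int) (hle : ∀ x ∈ v, x ≤ 0) :
    pvSumSq ((v.map (fun x => (-x).toNat) : List ℕ) : Multiset ℕ) = (v.map (fun x => x ^ 2)).sum := by
  simp only [pvSumSq, Multiset.map_coe, Multiset.sum_coe, List.map_map]
  congr 1
  apply List.map_congr_left
  intro x hx
  have hx0 := hle x hx
  have hc : ((-x).toNat : Int) = -x := by omega
  simp only [Function.comp]
  rw [hc]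
  ring

lemma pv_mset_sup (v : List Int) (m : Int) (hm : m ∈ v) (hmin : ∀ y ∈ v, m ≤ y) :
    ((v.map (fun x => (-x).toNat) : List ℕ) : Multiset ℕ).sup = (-m).toNat := by
  refine le_antisymm (Multiset.sup_le.mpr ?_) (Multiset.le_sup ?_)
  · intro y hy
    rw [Multiset.mem_coe, List.mem_map] at hy
    obtain ⟨x, hx, rfl⟩ := hy
    have := hmin x hx
    omega
  · rw [Multiset.mem_coe, List.mem_map]
    exact ⟨m, hm, rfl⟩

lemma pv_mset_erase (v : List Int) (m : Int) (hm : m ∈ v) :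
    ((v.map (fun x => (-x).toNat) : List ℕ) : Multiset ℕ) =
      ((-m).toNat) ::ₘ (((v.erase m).map (fun x => (-x).toNat) : List ℕ) : Multiset ℕ) := by
  have hperm : v.Perm (m :: v.erase m) := List.perm_cons_erase hm
  have h2 := hperm.map (fun x => (-x).toNat)
  rw [Multiset.coe_eq_coe.mpr h2]
  simp

lemma pv_heapify_eq (v : List Int) (m : Int) (hm : PySem.List.min? v (fun x => x) = some m) :
    pvHeapify v = m :: v.erase m := by
  simp [pvHeapify, hm]

lemma pv_aloop_eq_gv : ∀ (n : ℕ) (v : List Int), v ≠ [] → (∀ x ∈ v, x ≤ 0) →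
    pvALoop n (pvHeapify v) = some (pvGv n ((v.map (fun x => (-x).toNat) : List ℕ) : Multiset ℕ)) := by
  intro n
  induction n with
  | zero =>
    intro v hv hle
    obtain ⟨m, hm⟩ : ∃ m, PySem.List.min? v (fun x => x) = some m := by
      cases h : PySem.List.min? v (fun x => x) with
      | none => exact absurd ((PySem.List.min?_eq_none_iff v (fun x => x)).mp h) hv
      | some m => exact ⟨m, rfl⟩
    have hmem : m ∈ v := PySem.List.min?_mem hm
    rw [pv_heapify_eq v m hm]
    simp only [pvALoop, pvGv]
    rw [pv_foldl_sq, pv_mset_sq v hle]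
    rw [((List.perm_cons_erase hmem).map (fun x => x ^ 2)).sum_eq]
    simp
  | succ n ih =>
    intro v hv hle
    obtain ⟨m, hm⟩ : ∃ m, PySem.List.min? v (fun x => x) = some m := by
      cases h : PySem.List.min? v (fun x => x) with
      | none => exact absurd ((PySem.List.min?_eq_none_iff v (fun x => x)).mp h) hv
      | some m => exact ⟨m, rfl⟩
    have hmem : m ∈ v := PySem.List.min?_mem hm
    have hmin : ∀ y ∈ v, m ≤ y := fun y hy => PySem.List.min?_isMin hm y hy
    have hm0 := hle m hmem
    have hsup := pv_mset_sup v m hmem hmin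
    rw [pv_heapify_eq v m hm]
    simp only [pvALoop]
    by_cases hmz : m = 0
    · subst hmz
      simp only [neg_zero, BEq.rfl, if_true]
      have hsz : ((v.map (fun x => (-x).toNat) : List ℕ) : Multiset ℕ).sup = 0 := by
        rw [hsup]; simp
      simp [pvGv, hsz]
    · have hbe : ((-m == 0) = false) := by
        rw [beq_eq_false_iff_ne]
        omega
      rw [hbe, if_neg (by simp)]
      have hle' : ∀ x ∈ (m + 1) :: v.erase m, x ≤ 0 := by
        intro x hx
        rcases List.mem_cons.mp hx with rfl | hx'
        · omega
        · exact hle x (List.mem_of_mem_erase hx')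
      rw [ih ((m + 1) :: v.erase m) (by simp) hle']
      congr 1
      have hsupne : ((v.map (fun x => (-x).toNat) : List ℕ) : Multiset ℕ).sup ≠ 0 := by
        rw [hsup]; omega
      simp only [pvGv, if_neg hsupne]
      congr 1
      have h1 : (((m + 1) :: v.erase m).map (fun x => (-x).toNat) : Multiset ℕ) =
          ((-(m + 1)).toNat) ::ₘ (((v.erase m).map (fun x => (-x).toNat) : List ℕ) : Multiset ℕ) := by
        simp
      rw [h1]
      have h2 := pv_mset_erase v m hmem
      rw [hsup, h2, Multiset.erase_cons_head]
      congr 1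
      omega

-- ---- dictionary lemmas ----

lemma pv_dictA_get? {κ : Type} [BEq κ] [LawfulBEq κ] (g : κ → Int) :
    ∀ (l : List κ) (d : PySem.Dict κ Int) (x : κ),
      (l.foldl (fun d x => d.insert x (g x)) d).get? x = if x ∈ l then some (g x) else d.get? x := by
  intro l
  induction l with
  | nil => intro d x; simp
  | cons y ys ih =>
    intro d x
    simp only [List.foldl_cons]
    rw [ih]
    by_cases hmem : x ∈ ys
    · simp [hmem]
    · by_cases hxy : x = y
      · subst hxy
        simp [hmem, PySem.Dict.get?_insert_self]
      · rw [if_neg hmem, if_neg (by simp [hxy, hmem])]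
        exact PySem.Dict.get?_insert_of_ne _ _ hxy

lemma pv_valuesA (xs : List Char) :
    PySem.Dict.values (xs.foldl (fun d x => d.insert x (-1 * (xs.count x : Int))) PySem.Dict.empty) =
      (PySem.Set.ofList xs).map (fun c => -1 * (xs.count c : Int)) := by
  have hkeys : (xs.foldl (fun d x => d.insert x (-1 * (xs.count x : Int))) PySem.Dict.empty).keys =
      PySem.Set.ofList xs := by
    rw [PySem.Dict.keys_foldl_insert]
    simp [PySem.Dict.keys_empty, PySem.Set.update_nil_left]
  have hnd : (xs.foldl (fun d x => d.insert x (-1 * (xs.count x : Int))) PySem.Dict.empty).keys.Nodup := by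
    apply PySem.Dict.nodup_keys_foldl_insert
    simp [PySem.Dict.keys_empty]
  rw [PySem.Dict.values_eq_map_keys _ hnd 0, hkeys]
  apply List.map_congr_left
  intro c hc
  have hcx : c ∈ xs := (PySem.Set.mem_ofList xs c).mp hc
  have hgc : (xs.foldl (fun d x => d.insert x (-1 * (xs.count x : Int))) PySem.Dict.empty).get? c =
      some (-1 * (xs.count c : Int)) := by
    rw [pv_dictA_get?]
    simp [hcx]
  rw [PySem.Dict.getD_eq_get?_getD, hgc]
  rfl

lemma pv_valuesB (xs : List Char) :
    PySem.Dict.values (xs.foldl (fun d ch => d.insert ch (d.getD ch 0 + 1)) PySem.Dict.empty) =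
      (PySem.Set.ofList xs).map (fun c => (xs.count c : Int)) := by
  rw [PySem.Dict.foldl_insert_getD_add_one_eq_counter]
  show ((PySem.Dict.counter xs).items.map (·.2)) = _
  rw [PySem.Dict.items_counter, List.map_map]
  rfl

-- ---- bridging the B port's folds to multiset sums ----

lemma pv_foldl_add_if (fs : List Int) (t : Int) :
    ∀ a, fs.foldl (fun a f => if f > t then a + (f - t) else a) a =
      a + (fs.map (fun f => if f > t then f - t else 0)).sum := by
  induction fs with
  | nil => intro a; simp
  | cons f l ih =>
    intro a
    simp only [List.foldl_cons, List.map_cons, List.sum_cons, ih]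
    by_cases h : f > t
    · rw [if_pos h, if_pos h]
      ring
    · rw [if_neg h, if_neg h]
      ring

lemma pv_cost_cast (l : List ℕ) (t : Int) (ht : 0 ≤ t) :
    pvCost (l.map (fun n : ℕ => ((n : Int)))) t = (((l : Multiset ℕ).map (fun p => p - t.toNat)).sum : ℕ) := by
  simp only [pvCost]
  rw [pv_foldl_add_if, zero_add, List.map_map]
  simp only [Multiset.map_coe, Multiset.sum_coe]
  induction l with
  | nil => simp
  | cons n l ih =>
    simp only [List.map_cons, List.sum_cons, ih]
    have h1 : ((fun f => if f > t then f - t else 0) ∘ fun n : ℕ => (n : Int)) n = ((n - t.toNat : ℕ) : Int) := by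
      simp only [Function.comp]
      split_ifs <;> omega
    rw [h1]
    push_cast
    ring

lemma pv_cost_antitone (fs : List Int) {u v : Int} (huv : u ≤ v) : pvCost fs v ≤ pvCost fs u := by
  simp only [pvCost]
  rw [pv_foldl_add_if, pv_foldl_add_if, zero_add, zero_add]
  apply List.sum_le_sum
  intro f _
  split_ifs <;> omega

lemma pv_bsearch_spec (fs : List Int) (k : Int) : ∀ (lo hi : Int), lo ≤ hi → pvCost fs hi ≤ k →
    lo ≤ pvBSearch fs k lo hi ∧ pvBSearch fs k lo hi ≤ hi ∧
      pvCost fs (pvBSearch fs k lo hi) ≤ k ∧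
      ∀ u, lo ≤ u → u < pvBSearch fs k lo hi → k < pvCost fs u := by
  have main : ∀ (fuel : ℕ) (lo hi : Int),
      (hi - lo).toNat ≤ fuel → lo ≤ hi → pvCost fs hi ≤ k →
      lo ≤ pvBSearch fs k lo hi ∧ pvBSearch fs k lo hi ≤ hi ∧
        pvCost fs (pvBSearch fs k lo hi) ≤ k ∧
        ∀ u, lo ≤ u → u < pvBSearch fs k lo hi → k < pvCost fs u := by
    intro fuel
    induction fuel with
    | zero =>
      intro lo hi hf hle hp
      have hlo : ¬ lo < hi := by omega
      rw [pvBSearch, dif_neg hlo]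
      have heq : lo = hi := by omega
      exact ⟨le_refl _, by omega, by rw [heq]; exact hp, fun u hu hu2 => by omega⟩
    | succ n ih =>
      intro lo hi hf hle hp
      by_cases h : lo < hi
      · rw [pvBSearch, dif_pos h]
        have hmid1 : lo ≤ PySem.Int.floordiv (lo + hi) 2 := (PySem.Int.floordiv_two_mid_bounds hle).1
        have hmid2 : PySem.Int.floordiv (lo + hi) 2 < hi := by
          have := PySem.Int.floordiv_eq_ediv_of_pos (a := lo + hi) (b := 2) (by omega)
          omega
        by_cases hc : pvCost fs (PySem.Int.floordiv (lo + hi) 2) ≤ k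
        · rw [if_pos hc]
          obtain ⟨r1, r2, r3, r4⟩ := ih lo (PySem.Int.floordiv (lo + hi) 2) (by omega) (by omega) hc
          exact ⟨r1, by omega, r3, r4⟩
        · rw [if_neg hc]
          obtain ⟨r1, r2, r3, r4⟩ := ih (PySem.Int.floordiv (lo + hi) 2 + 1) hi (by omega) (by omega) hp
          refine ⟨by omega, r2, r3, ?_⟩
          intro u hu hu2
          by_cases hum : u ≤ PySem.Int.floordiv (lo + hi) 2
          · have := pv_cost_antitone fs hum
            omega
          · exact r4 u (by omega) hu2
      · rw [pvBSearch, dif_neg h]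
        have heq : lo = hi := by omega
        exact ⟨le_refl _, by omega, by rw [heq]; exact hp, fun u hu hu2 => by omega⟩
  intro lo hi hle hp
  exact main (hi - lo).toNat lo hi (le_refl _) hle hp

-- ---- fold-to-sum casts for the B port ----

lemma pv_sum_fold_cast (l : List ℕ) : ∀ a : Int,
    (l.map (fun n : ℕ => ((n : Int)))).foldl (· + ·) a = a + (l.sum : Int) := by
  induction l with
  | nil => intro a; simp
  | cons n t ih =>
    intro a
    simp only [List.map_cons, List.foldl_cons, List.sum_cons, ih]
    push_cast
    ring

lemma pv_sq_fold_cast (l : List ℕ) : ∀ a : Int,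
    (l.map (fun n : ℕ => ((n : Int)))).foldl (fun a f => a + f * f) a = a + pvSumSq (l : Multiset ℕ) := by
  induction l with
  | nil => intro a; simp [pvSumSq]
  | cons n t ih =>
    intro a
    simp only [List.map_cons, List.foldl_cons, ih]
    have h : pvSumSq ((n :: t : List ℕ) : Multiset ℕ) = (n : Int) ^ 2 + pvSumSq (t : Multiset ℕ) := by
      rw [show ((n :: t : List ℕ) : Multiset ℕ) = n ::ₘ (t : Multiset ℕ) from rfl, pv_sumSq_cons]
    rw [h]
    ring

lemma pv_minsq_fold_cast (l : List ℕ) (t : Int) (ht : 0 ≤ t) : ∀ a : Int,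
    (l.map (fun n : ℕ => ((n : Int)))).foldl (fun a f => a + (min f t) * (min f t)) a =
      a + ((l : Multiset ℕ).map (fun p : ℕ => (((min p t.toNat : ℕ)) : Int) ^ 2)).sum := by
  induction l with
  | nil => intro a; simp
  | cons n ns ih =>
    intro a
    simp only [List.map_cons, List.foldl_cons, ih]
    have hmm : ((n :: ns : List ℕ) : Multiset ℕ) = n ::ₘ (ns : Multiset ℕ) := rfl
    rw [hmm, Multiset.map_cons, Multiset.sum_cons]
    have hmin : min ((n : Int)) t = ((min n t.toNat : ℕ) : Int) := by omega
    rw [hmin]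
    ring

lemma pv_cost_zero_of_max (fs : List Int) (M : Int) (hmax : ∀ y ∈ fs, y ≤ M) : pvCost fs M = 0 := by
  simp only [pvCost]
  rw [pv_foldl_add_if, zero_add]
  refine List.sum_eq_zero ?_
  intro x hx
  obtain ⟨f, hf, rfl⟩ := List.mem_map.mp hx
  rw [if_neg (by have := hmax f hf; omega)]

lemma pv_costN_zero (P : Multiset ℕ) : (P.map (fun p => p - 0)).sum = P.sum := by simp

-- the A port on a nonempty string computes the abstract greedy value on the count multiset
lemma pv_A_eval (s : String) (k : Int) (hxs : s.toList ≠ []) :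
    minimumSumOfSquares s k =
      pvGv k.toNat (((PySem.Set.ofList s.toList).map (fun c => s.toList.count c) : List ℕ) : Multiset ℕ) := by
  simp only [minimumSumOfSquares]
  rw [pv_valuesA s.toList]
  have hDne : PySem.Set.ofList s.toList ≠ [] := by
    obtain ⟨c, hc⟩ := List.exists_mem_of_ne_nil _ hxs
    intro h0
    have hmem := (PySem.Set.mem_ofList s.toList c).mpr hc
    rw [h0] at hmem
    simp at hmem
  have hvne : (PySem.Set.ofList s.toList).map (fun c => -1 * (s.toList.count c : Int)) ≠ [] := by
    simp [hDne]
  have hle : ∀ x ∈ (PySem.Set.ofList s.toList).map (fun c => -1 * (s.toList.count c : Int)), x ≤ 0 := by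
    intro x hx
    obtain ⟨c, hc, rfl⟩ := List.mem_map.mp hx
    have := Int.natCast_nonneg (s.toList.count c)
    omega
  rw [pv_aloop_eq_gv k.toNat _ hvne hle, Option.getD_some, List.map_map]
  congr 2
  apply List.map_congr_left
  intro c _
  simp only [Function.comp]
  omega

-- ===== VERDICT (by name: the statement is the Claim_ definition above) =====
theorem minimumSumOfSquares_spec : Claim_equal_minimumSumOfSquares := by
  intro s k _ hpre
  unfold Spec_minimumSumOfSquares
  by_cases hxs : s.toList = []
  · -- empty string: A runs zero iterations (k ≤ 0 by Pre_), B returns 0 either way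
    have hs : s = "" := by
      have := congrArg String.ofList hxs
      simpa using this
    have hk0 : k ≤ 0 := by
      rcases hpre with h | h
      · exact absurd hs h
      · exact h
    simp only [minimumSumOfSquares, minimumSumOfSquares_alt, hxs, List.foldl_nil]
    rw [Int.toNat_of_nonpos hk0]
    simp only [pvHeapify, pvALoop]
    norm_num [PySem.Dict.values]
    split_ifs <;> rfl
  · -- nonempty string
    rw [pv_A_eval s k hxs]
    simp only [minimumSumOfSquares_alt]
    rw [pv_valuesB s.toList]
    set l : List ℕ := (PySem.Set.ofList s.toList).map (fun c => s.toList.count c) with hl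
    have hfs : (PySem.Set.ofList s.toList).map (fun c => (s.toList.count c : Int)) =
        l.map (fun n : ℕ => ((n : Int))) := by
      rw [hl, List.map_map]
      rfl
    rw [hfs]
    have hlne : l ≠ [] := by
      rw [hl]
      intro h0
      obtain ⟨c, hc⟩ := List.exists_mem_of_ne_nil _ hxs
      have hmem := (PySem.Set.mem_ofList s.toList c).mpr hc
      have := List.map_eq_nil_iff.mp h0
      rw [this] at hmem
      simp at hmem
    have hpos : ∀ n ∈ l, 1 ≤ n := by
      intro n hn
      rw [hl] at hn
      obtain ⟨c, hc, rfl⟩ := List.mem_map.mp hn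
      have hcx : c ∈ s.toList := (PySem.Set.mem_ofList s.toList c).mp hc
      exact List.count_pos_iff.mpr hcx
    have hsum1 : 1 ≤ l.sum := by
      obtain ⟨n, hn⟩ := List.exists_mem_of_ne_nil _ hlne
      calc 1 ≤ n := hpos n hn
        _ ≤ l.sum := List.le_sum_of_mem hn
    have hP : ((l : Multiset ℕ)).sum = l.sum := by simp
    rw [pv_sum_fold_cast l 0, zero_add]
    by_cases hk1 : k ≥ (l.sum : Int)
    · rw [if_pos hk1]
      exact pv_gv_zero k.toNat _ (by rw [hP]; omega)
    · rw [if_neg hk1]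
      by_cases hk2 : k ≤ 0
      · rw [if_pos hk2, pv_sq_fold_cast l 0, zero_add, Int.toNat_of_nonpos hk2]
        rfl
      · rw [if_neg hk2]
        -- the water-filling branch
        obtain ⟨M, hM⟩ : ∃ m, PySem.List.max? (l.map (fun n : ℕ => ((n : Int)))) (fun x => x) = some m := by
          cases hm : PySem.List.max? (l.map (fun n : ℕ => ((n : Int)))) (fun x => x) with
          | none =>
            exact absurd ((PySem.List.max?_eq_none_iff _ _).mp hm) (by simp [hlne])
          | some m => exact ⟨m, rfl⟩
        rw [hM, Option.getD_some]
        have hMmax : ∀ y ∈ l.map (fun n : ℕ => ((n : Int))), y ≤ M := fun y hy =>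
          PySem.List.max?_isMax hM y hy
        have hMmem : M ∈ l.map (fun n : ℕ => ((n : Int))) := PySem.List.max?_mem hM
        have hM1 : 1 ≤ M := by
          obtain ⟨n, hn, rfl⟩ := List.mem_map.mp hMmem
          have := hpos n hn
          omega
        have hcost_hi : pvCost (l.map (fun n : ℕ => ((n : Int)))) M ≤ k :=
          le_trans (le_of_eq (pv_cost_zero_of_max _ M hMmax)) (by omega)
        obtain ⟨hb1, hb2, hb3, hb4⟩ := pv_bsearch_spec (l.map (fun n : ℕ => ((n : Int)))) k 1 M hM1 hcost_hi
        set t := pvBSearch (l.map (fun n : ℕ => ((n : Int)))) k 1 M with hto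
        have ht0 : 0 ≤ t := by omega
        have htT : ((t.toNat : ℕ) : Int) = t := by omega
        -- the two side conditions of the threshold characterisation
        have hcostt := pv_cost_cast l t ht0
        have ha : ((l : Multiset ℕ).map (fun p => p - t.toNat)).sum ≤ k.toNat := by omega
        have hbnd : k.toNat ≤ ((l : Multiset ℕ).map (fun p => p - (t.toNat - 1))).sum := by
          by_cases hteq : t = 1
          · have : ((l : Multiset ℕ).map (fun p => p - (t.toNat - 1))).sum = (l : Multiset ℕ).sum := by
              rw [show t.toNat - 1 = 0 by omega]
              exact pv_costN_zero _
            rw [this, hP]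
            omega
          · have hu := hb4 (t - 1) (by omega) (by omega)
            have := pv_cost_cast l (t - 1) (by omega)
            rw [show (t - 1).toNat = t.toNat - 1 by omega] at this
            omega
        -- evaluate the greedy value in closed form
        have hks : k.toNat ≤ ((l : Multiset ℕ)).sum := by rw [hP]; omega
        rw [pv_gv_eq_topW k.toNat _ hks]
        rw [pv_topW_char k.toNat (pvLayers (l : Multiset ℕ)) t.toNat (by omega)
          (by rw [pv_card_layers_lt]; exact ha)
          (by rw [pv_card_layers_le _ _ (by omega)]; exact hbnd)]
        rw [pv_wsum_layers_lt, pv_card_layers_lt]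
        rw [pv_minsq_fold_cast l t ht0 0, zero_add]
        rw [hcostt]
        have hcast : ((((l : Multiset ℕ).map (fun p => p - t.toNat)).sum : ℕ) : Int) =
          (((l : Multiset ℕ).map (fun p => p - t.toNat)).sum : Int) := rfl
        have hkc : ((k.toNat : ℕ) : Int) = k := by omega
        rw [hkc, htT]
        ring
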